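-- pv_equiv track=rewrite | github.com/driftbase-labs/driftbase-python | src/driftbase/connectors/mapper.py | detect_retry_patterns
-- ===== SOURCE A (Python) =====
-- from typing import Any
--
-- def detect_retry_patterns(tool_observations: list[dict[str, Any]]) -> int:
--     """
--     Detect retry patterns in tool observations.
--
--     Counts consecutive tool calls with the same tool name as potential retries.
--
--     Args:
--         tool_observations: List of tool observation dicts
--
--     Returns:
--         Number of detected retry iterations
--     """
--     if len(tool_observations) < 2:
--         return 0
--
--     retries = 0
--     prev_tool = None
--
--     for obs in tool_observations:
--         tool_name = obs.get("name") or obs.get("tool_name")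
--         if tool_name and tool_name == prev_tool:
--             retries += 1
--         prev_tool = tool_name
--
--     return retries
-- ===== SOURCE B (Python) =====
-- from itertools import groupby
--
-- def detect_retry_patterns(tool_observations):
--     names = [obs.get("name") or obs.get("tool_name") for obs in tool_observations]
--     return sum(sum(1 for _ in g) - 1 for k, g in groupby(names) if k)
-- ===== Notes on version B (the rewrite author's own statement) =====
-- stated objective: idiomatic
-- what changed: B projects the name list once and sums (run length - 1) over itertools.groupby runs with truthy keys, replacing A's guard + explicit prev/retries accumulator loop.
import Mathlib
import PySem

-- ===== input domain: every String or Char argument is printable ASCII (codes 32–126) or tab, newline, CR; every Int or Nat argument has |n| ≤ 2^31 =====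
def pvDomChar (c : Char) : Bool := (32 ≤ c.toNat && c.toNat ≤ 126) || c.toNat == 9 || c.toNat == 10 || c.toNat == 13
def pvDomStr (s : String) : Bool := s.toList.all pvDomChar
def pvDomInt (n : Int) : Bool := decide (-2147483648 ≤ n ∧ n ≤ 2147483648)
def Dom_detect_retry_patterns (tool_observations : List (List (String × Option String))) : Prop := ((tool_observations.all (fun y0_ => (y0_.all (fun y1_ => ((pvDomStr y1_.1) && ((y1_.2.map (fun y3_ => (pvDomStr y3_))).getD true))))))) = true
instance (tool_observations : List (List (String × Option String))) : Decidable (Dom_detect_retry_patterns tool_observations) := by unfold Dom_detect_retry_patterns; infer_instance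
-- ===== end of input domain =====

-- B replaces A's prev/retries accumulator loop with a name projection plus a groupby-style
-- run decomposition, summing (run length - 1) over truthy runs (idiomatic; same cost).


-- ===== PORT A =====
-- obs.get(k): first-match association-list lookup; a stored None and a missing key both give none
def pvObsGet (obs : List (String × Option String)) (k : String) : Option String :=
  (obs.lookup k).getD none

-- Python truthiness of the looked-up value (None and "" are falsy)
def pvTruthy : Option String → Bool
  | some s => s != ""
  | none => false

-- `obs.get("name") or obs.get("tool_name")`
def pvToolName (obs : List (String × Option String)) : Option String :=
  let a := pvObsGet obs "name"
  if pvTruthy a then a else pvObsGet obs "tool_name"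

def detect_retry_patterns (tool_observations : List (List (String × Option String))) : Int :=
  if tool_observations.length < 2 then 0
  else
    (tool_observations.foldl
      (fun (st : Int × Option String) obs =>
        let tool_name := pvToolName obs
        (if pvTruthy tool_name && (tool_name == st.2) then st.1 + 1 else st.1, tool_name))
      (0, none)).1

-- ===== PORT B =====
-- groupby: peel one run of elements equal to the head; a truthy run of length L contributes L-1
def pvRunCount : List (Option String) → Int
  | [] => 0
  | n :: rest =>
    (if pvTruthy n then ((rest.takeWhile (· == n)).length : Int) else 0)
      + pvRunCount (rest.dropWhile (· == n))
termination_by l => l.length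
decreasing_by
  have := List.length_dropWhile_le (p := (· == n)) (l := rest)
  simp only [List.length_cons]
  omega

def detect_retry_patterns_alt (tool_observations : List (List (String × Option String))) : Int :=
  pvRunCount (tool_observations.map pvToolName)

-- ===== PRECONDITION & SPEC =====
def Spec_detect_retry_patterns (tool_observations : List (List (String × Option String))) (out : Int) : Prop := out = detect_retry_patterns_alt tool_observations
instance (tool_observations : List (List (String × Option String))) (out : Int) : Decidable (Spec_detect_retry_patterns tool_observations out) := by unfold Spec_detect_retry_patterns; infer_instance

-- ===== CLAIM (what is proved, stated in full; the proofs are below) =====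
def Claim_equal_detect_retry_patterns : Prop := ∀ (tool_observations : List (List (String × Option String))), Dom_detect_retry_patterns tool_observations → Spec_detect_retry_patterns tool_observations (detect_retry_patterns tool_observations)

-- ===== LEMMAS AND PROOFS =====

@[simp] theorem pvRunCount_nil : pvRunCount [] = 0 := by rw [pvRunCount]

theorem pvRunCount_cons (n : Option String) (rest : List (Option String)) :
    pvRunCount (n :: rest) =
      (if pvTruthy n then ((rest.takeWhile (· == n)).length : Int) else 0)
        + pvRunCount (rest.dropWhile (· == n)) := by
  rw [pvRunCount]

-- pairwise count: +1 for each element that is truthy and equal to its predecessor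
def pvCnt : Option String → List (Option String) → Int
  | _, [] => 0
  | p, n :: rest => (if pvTruthy n && (n == p) then 1 else 0) + pvCnt n rest

theorem pvCnt_eq_runCount_cons : ∀ (rest : List (Option String)) (n : Option String),
    pvCnt n rest = pvRunCount (n :: rest) := by
  intro rest
  induction rest with
  | nil => intro n; simp [pvCnt, pvRunCount_cons]
  | cons m rest' ih =>
    intro n
    by_cases hmn : m = n
    · subst hmn
      rw [pvCnt, ih]
      rw [pvRunCount_cons, pvRunCount_cons]
      simp only [List.takeWhile_cons, List.dropWhile_cons, beq_self_eq_true]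
      by_cases ht : pvTruthy m
      · simp [ht]; ring
      · simp [ht]
    · rw [pvCnt, ih]
      rw [pvRunCount_cons (n := n)]
      have hbeq : (m == n) = false := by simpa using hmn
      simp [hbeq]

theorem pvCnt_none (l : List (Option String)) : pvCnt none l = pvRunCount l := by
  cases l with
  | nil => simp [pvCnt]
  | cons n rest =>
    rw [pvCnt, pvCnt_eq_runCount_cons]
    have : (pvTruthy n && (n == none)) = false := by
      cases n <;> simp [pvTruthy]
    rw [this]
    simp

theorem pvFold_cnt : ∀ (names : List (Option String)) (r : Int) (p : Option String),
    (names.foldl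
      (fun (st : Int × Option String) n =>
        (if pvTruthy n && (n == st.2) then st.1 + 1 else st.1, n)) (r, p)).1
      = r + pvCnt p names := by
  intro names
  induction names with
  | nil => intro r p; simp [pvCnt]
  | cons n rest ih =>
    intro r p
    rw [List.foldl_cons, pvCnt, ih]
    split <;> ring

theorem pvRunCount_short (l : List (Option String)) (h : l.length < 2) :
    pvRunCount l = 0 := by
  match l, h with
  | [], _ => simp
  | [n], _ => simp [pvRunCount_cons]

-- ===== VERDICT (by name: the statement is the Claim_ definition above) =====
theorem detect_retry_patterns_spec : Claim_equal_detect_retry_patterns := by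
  intro xs _
  unfold Spec_detect_retry_patterns detect_retry_patterns detect_retry_patterns_alt
  by_cases h : xs.length < 2
  · rw [if_pos h, pvRunCount_short _ (by simpa using h)]
  · rw [if_neg h]
    have : (xs.foldl
        (fun (st : Int × Option String) obs =>
          let tool_name := pvToolName obs
          (if pvTruthy tool_name && (tool_name == st.2) then st.1 + 1 else st.1, tool_name))
        (0, none)) =
      ((xs.map pvToolName).foldl
        (fun (st : Int × Option String) n =>
          (if pvTruthy n && (n == st.2) then st.1 + 1 else st.1, n)) (0, none)) := by
      rw [List.foldl_map]
    rw [this, pvFold_cnt, pvCnt_none]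
    simp
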